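-- pv_equiv track=rewrite | github.com/rambus2006/Algorithm_study_7-2team | comet/BOJ/2133/sol.py | find
-- ===== SOURCE A (Python) =====
-- def find(num):
--     if num % 2 == 1:
--         return 0
--     dp = [0] * (num + 1)
--     dp[0] = 1
--     dp[2] = 3
--     for i in range(4, num + 1, 2):
--         dp[i] = dp[i - 2] * 3
--         for j in range(4, i + 1, 2):
--             dp[i] += dp[i - j] * 2
--
--     return dp[num]
-- ===== SOURCE B (Python) =====
-- def find(num):
--     if num % 2 == 1:
--         return 0
--     a, b = 1, 3  # number of tilings of a 3x0 and a 3x2 rectangle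
--     for _ in range(num // 2):
--         a, b = b, 4 * b - a
--     return a
-- ===== Notes on version B (the rewrite author's own statement) =====
-- stated objective: alternative
-- what changed: Replaces the O(n^2) dp-table with inner prefix re-summation by the O(n) two-variable linear recurrence f(n)=4f(n-2)-f(n-4), keeping only the last two even values.
-- outside the precondition, e.g. on find(0): A raises IndexError, B returns 1; on find(-2): A raises IndexError, B returns 1
import Mathlib
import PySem

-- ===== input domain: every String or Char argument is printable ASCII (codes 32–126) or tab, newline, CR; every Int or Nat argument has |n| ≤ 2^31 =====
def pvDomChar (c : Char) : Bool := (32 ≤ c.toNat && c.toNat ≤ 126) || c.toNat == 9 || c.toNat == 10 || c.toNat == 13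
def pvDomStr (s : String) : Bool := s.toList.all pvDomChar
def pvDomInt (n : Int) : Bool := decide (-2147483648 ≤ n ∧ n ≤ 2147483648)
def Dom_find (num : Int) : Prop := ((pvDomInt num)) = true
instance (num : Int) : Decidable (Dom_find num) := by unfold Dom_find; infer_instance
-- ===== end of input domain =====

-- B replaces A's dp table with inner prefix re-summation by the two-variable
-- linear recurrence f(n) = 4 f(n-2) - f(n-4) (alternative algorithm, same results).


-- ===== PORT A =====
-- inner loop body: dp[i] += dp[i - j] * 2
def innerBody (i : Int) (dp : List Int) (j : Int) : List Int :=
  PySem.List.pySetD dp i (PySem.List.pyGetD dp i 0 + PySem.List.pyGetD dp (i - j) 0 * 2)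

-- outer loop body: dp[i] = dp[i - 2] * 3; for j in range(4, i + 1, 2): dp[i] += dp[i - j] * 2
def outerBody (dp : List Int) (i : Int) : List Int :=
  (PySem.List.pyRange 4 (i + 1) 2).foldl (innerBody i)
    (PySem.List.pySetD dp i (PySem.List.pyGetD dp (i - 2) 0 * 3))

def find (num : Int) : Int :=
  if PySem.Int.mod num 2 = 1 then 0
  else
    let dp := PySem.List.pyRepeat [(0 : Int)] (num + 1)
    let dp := PySem.List.pySetD dp 0 1
    let dp := PySem.List.pySetD dp 2 3
    let dp := (PySem.List.pyRange 4 (num + 1) 2).foldl outerBody dp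
    PySem.List.pyGetD dp num 0

-- ===== PORT B =====
-- loop body: a, b = b, 4 * b - a
def altBody (p : Int × Int) (_ : Int) : Int × Int := (p.2, 4 * p.2 - p.1)

def find_alt (num : Int) : Int :=
  if PySem.Int.mod num 2 = 1 then 0
  else
    let p := (PySem.List.pyRange 0 (PySem.Int.floordiv num 2) 1).foldl altBody (1, 3)
    p.1

-- ===== PRECONDITION & SPEC =====
-- Pre_ excludes exactly the even num ≤ 0, on which A raises IndexError (dp[0]=1 / dp[2]=3 on a too-short list).
def Pre_find (num : Int) : Prop := PySem.Int.mod num 2 = 1 ∨ 2 ≤ num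
instance (num : Int) : Decidable (Pre_find num) := by unfold Pre_find; infer_instance
def pvWitness_find : Int := 6

def Spec_find (num : Int) (out : Int) : Prop := out = find_alt num
instance (num : Int) (out : Int) : Decidable (Spec_find num out) := by unfold Spec_find; infer_instance

-- ===== CLAIM (what is proved, stated in full; the proofs are below) =====
def Claim_equal_find : Prop := ∀ (num : Int), Dom_find num → Pre_find num → Spec_find num (find num)

-- ===== LEMMAS AND PROOFS =====
def fB : Nat → Int
  | 0 => 1
  | 1 => 3
  | k + 2 => 4 * fB (k + 1) - fB k
def Sf : Nat → Int
  | 0 => 0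
  | c + 1 => Sf c + fB c
lemma fB_eq (k : Nat) : fB (k + 2) = 3 * fB (k + 1) + 2 * Sf (k + 1) := by
  induction k with
  | zero => simp [fB, Sf]
  | succ k ih =>
    have h : fB (k + 3) = 4 * fB (k + 2) - fB (k + 1) := rfl
    have hs : Sf (k + 2) = Sf (k + 1) + fB (k + 1) := rfl
    rw [show k + 1 + 2 = k + 3 from rfl, h, hs]
    linarith [ih]
lemma getD_setD (dp : List Int) (a b v : Int) (ha : 0 ≤ a) (hb : 0 ≤ b)
    (hbl : b < (dp.length : Int)) :
    PySem.List.pyGetD (PySem.List.pySetD dp b v) a 0 =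
      if a = b then v else PySem.List.pyGetD dp a 0 := by
  obtain ⟨bn, rfl⟩ : ∃ bn : Nat, b = (bn : Int) := ⟨b.toNat, (Int.toNat_of_nonneg hb).symm⟩
  obtain ⟨an, rfl⟩ : ∃ an : Nat, a = (an : Int) := ⟨a.toNat, (Int.toNat_of_nonneg ha).symm⟩
  rw [PySem.List.pyGetD_pySetD_natCast dp bn an v 0 (by exact_mod_cast hbl)]
  simp [Nat.cast_inj]
lemma listsum_eq (c : Nat) (f : Nat → Int) :
    ((List.range c).map f).sum = ∑ t ∈ Finset.range c, f t := rfl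
lemma sumRev (c : Nat) (g : Nat → Int) :
    ((List.range c).map (fun t => g (c - 1 - t) * 2)).sum = 2 * ((List.range c).map g).sum := by
  rw [listsum_eq, listsum_eq, Finset.sum_range_reflect (fun t => g t * 2) c, ← Finset.sum_mul]
  ring
lemma sumFB (c : Nat) (fB Sf : Nat → Int) (h0 : Sf 0 = 0) (hs : ∀ c, Sf (c+1) = Sf c + fB c) :
    ((List.range c).map fB).sum = Sf c := by
  induction c with
  | zero => simp [h0]
  | succ c ih => rw [List.range_succ]; simp [ih, hs]

lemma innerFold (js : List Int) (dp : List Int) (i : Int) (h0 : 0 ≤ i)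
    (hi : i < (dp.length : Int)) (hjs : ∀ j ∈ js, 0 < j ∧ j ≤ i) :
    (js.foldl (innerBody i) dp).length = dp.length ∧
    (∀ m : Int, 0 ≤ m → m ≠ i →
      PySem.List.pyGetD (js.foldl (innerBody i) dp) m 0 = PySem.List.pyGetD dp m 0) ∧
    PySem.List.pyGetD (js.foldl (innerBody i) dp) i 0 =
      PySem.List.pyGetD dp i 0 + (js.map (fun j => PySem.List.pyGetD dp (i - j) 0 * 2)).sum := by
  induction js generalizing dp with
  | nil => simp
  | cons j js ih =>
    obtain ⟨hj0, hji⟩ := hjs j (List.mem_cons_self ..)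
    have hlen1 : (innerBody i dp j).length = dp.length := by
      simp [innerBody, PySem.List.length_pySetD]
    have hget1 : ∀ m : Int, 0 ≤ m → PySem.List.pyGetD (innerBody i dp j) m 0 =
        if m = i then PySem.List.pyGetD dp i 0 + PySem.List.pyGetD dp (i - j) 0 * 2
        else PySem.List.pyGetD dp m 0 := by
      intro m hm
      exact getD_setD dp m i _ hm h0 hi
    obtain ⟨l1, l2, l3⟩ := ih (innerBody i dp j) (by rw [hlen1]; exact hi)
      (fun j' hj' => hjs j' (List.mem_cons_of_mem _ hj'))
    refine ⟨by rw [List.foldl_cons, l1, hlen1], ?_, ?_⟩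
    · intro m hm hne
      rw [List.foldl_cons, l2 m hm hne, hget1 m hm, if_neg hne]
    · rw [List.foldl_cons, l3, hget1 i h0, if_pos rfl]
      have hmap : (js.map (fun j' => PySem.List.pyGetD (innerBody i dp j) (i - j') 0 * 2)) =
          js.map (fun j' => PySem.List.pyGetD dp (i - j') 0 * 2) := by
        apply List.map_congr_left; intro j' hj'
        obtain ⟨h1, h2⟩ := hjs j' (List.mem_cons_of_mem _ hj')
        rw [hget1 (i - j') (by omega), if_neg (by omega)]
      rw [hmap]; simp; ring
lemma altLoop (n : Nat) :
    (PySem.List.pyRange 0 (n : Int) 1).foldl altBody (1, 3) = (fB n, fB (n + 1)) := by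
  induction n with
  | zero => simp [PySem.List.pyRange_one_eq_nil, fB]
  | succ n ih =>
    have : ((n + 1 : Nat) : Int) = (n : Int) + 1 := by push_cast; ring
    rw [this, PySem.List.pyRange_one_succ_right (Int.natCast_nonneg n),
      List.foldl_append, ih]
    simp only [List.foldl_cons, List.foldl_nil, altBody]
    have : fB (n + 1 + 1) = 4 * fB (n + 1) - fB n := rfl
    rw [this]

def DpInv (n : Nat) (dp : List Int) (c : Nat) : Prop :=
  dp.length = 2 * n + 1 ∧ ∀ t : Nat, t ≤ c → PySem.List.pyGetD dp ((2 * t : Nat) : Int) 0 = fB t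

lemma outerStep (n : Nat) (dp : List Int) (k : Nat) (hk : k + 2 ≤ n)
    (hInv : DpInv n dp (k + 1)) : DpInv n (outerBody dp (4 + 2 * (k : Int))) (k + 2) := by
  obtain ⟨hlen, hval⟩ := hInv
  set i : Int := 4 + 2 * (k : Int) with hidef
  have hilen : i < (dp.length : Int) := by rw [hlen, hidef]; push_cast; omega
  have hi0 : (0 : Int) ≤ i := by rw [hidef]; positivity
  set dp1 := PySem.List.pySetD dp i (PySem.List.pyGetD dp (i - 2) 0 * 3) with hdp1
  have hlen1 : dp1.length = 2 * n + 1 := by rw [hdp1, PySem.List.length_pySetD, hlen]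
  have hget1 : ∀ m : Int, 0 ≤ m → PySem.List.pyGetD dp1 m 0 =
      if m = i then PySem.List.pyGetD dp (i - 2) 0 * 3 else PySem.List.pyGetD dp m 0 :=
    fun m hm => getD_setD dp m i _ hm hi0 hilen
  have hcnt : ((i + 1 - 4 + 2 - 1) / 2).toNat = k + 1 := by rw [hidef]; omega
  have hrange : PySem.List.pyRange 4 (i + 1) 2 =
      (List.range (k + 1)).map (fun t : Nat => 4 + 2 * (t : Int)) := by
    rw [PySem.List.pyRange_of_pos 4 (i + 1) (by norm_num),
      if_pos (by rw [hidef]; omega), hcnt]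
  have hjs : ∀ j ∈ (List.range (k + 1)).map (fun t : Nat => 4 + 2 * (t : Int)), 0 < j ∧ j ≤ i := by
    intro j hj
    simp only [List.mem_map, List.mem_range] at hj
    obtain ⟨t, ht, rfl⟩ := hj
    refine ⟨by positivity, by rw [hidef]; omega⟩
  obtain ⟨l1, l2, l3⟩ := innerFold _ dp1 i hi0 (by rw [hlen1, ← hlen]; exact hilen) hjs
  constructor
  · rw [outerBody, hrange, l1, hlen1]
  · intro t ht
    rcases Nat.lt_or_ge t (k + 2) with hlt | hge
    · have hne : ((2 * t : Nat) : Int) ≠ i := by rw [hidef]; push_cast; omega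
      rw [outerBody, hrange, ← hdp1, l2 _ (by positivity) hne, hget1 _ (by positivity), if_neg hne]
      exact hval t (by omega)
    · have ht2 : t = k + 2 := by omega
      subst ht2
      have hti : ((2 * (k + 2) : Nat) : Int) = i := by rw [hidef]; push_cast; ring
      rw [outerBody, hrange, ← hdp1, hti, l3, hget1 i hi0, if_pos rfl]
      have hsum : ((List.range (k + 1)).map (fun t : Nat => 4 + 2 * (t : Int))).map
            (fun j => PySem.List.pyGetD dp1 (i - j) 0 * 2) =
          (List.range (k + 1)).map (fun t => fB (k + 1 - 1 - t) * 2) := by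
        rw [List.map_map]
        apply List.map_congr_left; intro t ht
        simp only [List.mem_range] at ht
        have hij : i - (4 + 2 * (t : Int)) = ((2 * (k - t) : Nat) : Int) := by
          rw [hidef]; push_cast; omega
        have hne2 : ((2 * (k - t) : Nat) : Int) ≠ i := by rw [hidef]; push_cast; omega
        simp only [Function.comp]
        rw [hij, hget1 _ (by positivity), if_neg hne2, hval (k - t) (by omega)]
        congr 2
      rw [hsum, sumRev, sumFB _ fB Sf rfl (fun _ => rfl)]
      have hi2 : PySem.List.pyGetD dp (i - 2) 0 = fB (k + 1) := by
        have h2 : i - 2 = ((2 * (k + 1) : Nat) : Int) := by rw [hidef]; push_cast; ring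
        rw [h2, hval (k + 1) (by omega)]
      rw [hi2, fB_eq k]
      ring
lemma outerFold (n : Nat) (dp0 : List Int) (h0 : DpInv n dp0 1) (m : Nat) (hm : m + 1 ≤ n) :
    DpInv n (((List.range m).map (fun k : Nat => 4 + 2 * (k : Int))).foldl outerBody dp0) (m + 1) := by
  induction m with
  | zero => simpa using h0
  | succ m ih =>
    rw [List.range_succ, List.map_append, List.foldl_append]
    exact outerStep n _ m (by omega) (ih (by omega))


theorem main (num : Int) (hp : PySem.Int.mod num 2 = 1 ∨ 2 ≤ num) : find num = find_alt num := by
  rcases hp with hodd | h2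
  · rw [find, find_alt, if_pos hodd, if_pos hodd]
  · have hmod := PySem.Int.mod_eq_emod_of_pos (a := num) (b := 2) (by norm_num)
    rcases Int.even_or_odd num with he | ho
    · obtain ⟨n, hn⟩ : ∃ n : Nat, num = 2 * (n : Int) ∧ 1 ≤ n := by
        obtain ⟨c, hc⟩ := he
        exact ⟨c.toNat, by omega, by omega⟩
      obtain ⟨hn, hn1⟩ := hn
      have hcond : ¬ PySem.Int.mod num 2 = 1 := by rw [hmod]; omega
      rw [find, find_alt, if_neg hcond, if_neg hcond]
      -- B side
      have hfd : PySem.Int.floordiv num 2 = (n : Int) := by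
        rw [PySem.Int.floordiv_eq_ediv_of_pos (by norm_num), hn]; omega
      rw [hfd, altLoop n]
      -- A side
      have hrep : PySem.List.pyRepeat [(0 : Int)] (num + 1) = List.replicate (2 * n + 1) 0 := by
        rw [PySem.List.pyRepeat_singleton]; congr 1; omega
      have hlen0 : (List.replicate (2 * n + 1) (0 : Int)).length = 2 * n + 1 := by simp
      have hinv0 : DpInv n (PySem.List.pySetD (PySem.List.pySetD (List.replicate (2 * n + 1) (0 : Int)) 0 1) 2 3) 1 := by
        constructor
        · rw [PySem.List.length_pySetD, PySem.List.length_pySetD, hlen0]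
        · intro t ht
          interval_cases t
          · rw [getD_setD _ _ 2 3 (by norm_num) (by norm_num)
                (by rw [PySem.List.length_pySetD, hlen0]; push_cast; omega),
              if_neg (by norm_num),
              getD_setD _ _ 0 1 (by norm_num) (by norm_num) (by rw [hlen0]; push_cast; omega),
              if_pos (by norm_num)]
            rfl
          · rw [show ((2 * 1 : Nat) : Int) = 2 by norm_num,
              getD_setD _ _ 2 3 (by norm_num) (by norm_num)
                (by rw [PySem.List.length_pySetD, hlen0]; push_cast; omega),
              if_pos rfl]
            rfl
      have hcnt2 : ((num + 1 - 4 + 2 - 1) / 2).toNat = n - 1 := by omega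
      have hrange2 : PySem.List.pyRange 4 (num + 1) 2 =
          (List.range (n - 1)).map (fun k : Nat => 4 + 2 * (k : Int)) := by
        rw [PySem.List.pyRange_of_pos 4 (num + 1) (by norm_num)]
        by_cases h4 : (4 : Int) < num + 1
        · rw [if_pos h4, hcnt2]
        · rw [if_neg h4]
          have : n - 1 = 0 := by omega
          rw [this]
      rw [hrep, hrange2]
      obtain ⟨hlenf, hvalf⟩ := outerFold n _ hinv0 (n - 1) (by omega)
      have := hvalf ((n - 1) + 1) (le_refl _)
      rw [show (n - 1) + 1 = n by omega] at this
      rw [show num = ((2 * n : Nat) : Int) by push_cast; omega, this]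
    · obtain ⟨c, hc⟩ := ho
      have h1 : PySem.Int.mod num 2 = 1 := by rw [hmod]; omega
      rw [find, find_alt, if_pos h1, if_pos h1]

-- ===== VERDICT (by name: the statement is the Claim_ definition above) =====
theorem find_spec : Claim_equal_find := by
  intro num _ hp
  unfold Spec_find Pre_find at *
  exact main num hp
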